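-- pv_equiv track=rewrite | github.com/ingvld/advent_of_code | 2017/04 ¤¤/4-2.py | validate_passphrase
-- ===== SOURCE A (Python) =====
-- def validate_passphrase(pp):
--     combos = set()
--     for word in pp.split():
--         combo = ''.join(sorted(word))
--         if combo in combos:
--             return 0
--         combos.add(combo)
--     return 1
-- ===== SOURCE B (Python) =====
-- def validate_passphrase(pp):
--     sigs = sorted(''.join(sorted(w)) for w in pp.split())
--     for prev, cur in zip(sigs, sigs[1:]):
--         if prev == cur:
--             return 0
--     return 1
-- ===== Notes on version B (the rewrite author's own statement) =====
-- stated objective: alternative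
-- what changed: Replaced the hash-set membership loop with sort-then-scan: sort the canonical signatures and return 0 exactly when two adjacent sorted signatures are equal, so no set is built or queried.
import Mathlib
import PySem

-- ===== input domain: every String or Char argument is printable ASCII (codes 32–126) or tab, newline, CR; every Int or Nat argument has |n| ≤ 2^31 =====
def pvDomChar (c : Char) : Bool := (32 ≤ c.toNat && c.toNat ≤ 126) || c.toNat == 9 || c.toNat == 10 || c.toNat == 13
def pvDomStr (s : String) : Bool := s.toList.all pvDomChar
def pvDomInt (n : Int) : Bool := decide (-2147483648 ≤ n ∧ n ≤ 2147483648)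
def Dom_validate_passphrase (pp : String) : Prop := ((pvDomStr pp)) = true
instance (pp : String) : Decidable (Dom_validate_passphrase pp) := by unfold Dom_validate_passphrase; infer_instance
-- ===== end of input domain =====

-- B replaces A's hash-set membership loop by sorting the canonical signatures and
-- scanning adjacent pairs for an equal neighbour (objective: alternative).


-- ===== PORT A =====
-- ''.join(sorted(word)) — exact: sorted of the characters, rebuilt as a string
def pvCanon (w : String) : String :=
  String.ofList (PySem.List.sorted w.toList (fun c => c) false)

-- the for-loop with its early 'return 0'
def pvLoopA : List String → PySem.Set String → Int
  | [], _ => 1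
  | w :: ws, combos =>
      let combo := pvCanon w
      if PySem.Set.contains combos combo then 0
      else pvLoopA ws (PySem.Set.add combos combo)

def validate_passphrase (pp : String) : Int :=
  pvLoopA (PySem.Str.split₀ pp) PySem.Set.empty

-- ===== PORT B =====
-- 'for prev, cur in zip(sigs, sigs[1:]): if prev == cur: return 0' — the adjacent scan
def pvAdjScan : List String → Int
  | a :: b :: t => if a == b then 0 else pvAdjScan (b :: t)
  | _ => 1

def validate_passphrase_alt (pp : String) : Int :=
  let sigs := PySem.List.sorted ((PySem.Str.split₀ pp).map pvCanon) (fun x => x) false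
  pvAdjScan sigs

-- ===== PRECONDITION & SPEC =====
def Spec_validate_passphrase (pp : String) (out : Int) : Prop := out = validate_passphrase_alt pp
instance (pp : String) (out : Int) : Decidable (Spec_validate_passphrase pp out) := by unfold Spec_validate_passphrase; infer_instance

-- ===== CLAIM (what is proved, stated in full; the proofs are below) =====
def Claim_equal_validate_passphrase : Prop := ∀ (pp : String), Dom_validate_passphrase pp → Spec_validate_passphrase pp (validate_passphrase pp)

-- ===== LEMMAS AND PROOFS =====

-- A's loop returns 1 iff the canonical words are pairwise distinct and disjoint from the accumulator
theorem pvLoopA_eq (ws : List String) (s : PySem.Set String) :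
    pvLoopA ws s =
      if (ws.map pvCanon).Nodup ∧ ∀ c ∈ ws.map pvCanon, c ∉ s then 1 else 0 := by
  induction ws generalizing s with
  | nil => simp [pvLoopA]
  | cons w ws ih =>
    unfold pvLoopA
    by_cases hc : PySem.Set.contains s (pvCanon w)
    · rw [if_pos hc]
      have hw : pvCanon w ∈ s := (PySem.Set.contains_iff s (pvCanon w)).mp hc
      rw [if_neg]
      rintro ⟨-, hall⟩
      exact hall (pvCanon w) (by simp) hw
    · rw [if_neg hc, ih]
      have hw : pvCanon w ∉ s := fun h => hc ((PySem.Set.contains_iff s (pvCanon w)).mpr h)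
      have hiff : ((ws.map pvCanon).Nodup ∧ ∀ c ∈ ws.map pvCanon, c ∉ s.add (pvCanon w)) ↔
          (((w :: ws).map pvCanon).Nodup ∧ ∀ c ∈ (w :: ws).map pvCanon, c ∉ s) := by
        simp only [List.map_cons, List.nodup_cons, List.mem_cons, PySem.Set.mem_add]
        constructor
        · rintro ⟨hn, hall⟩
          refine ⟨⟨fun hm => (hall _ hm) (Or.inr rfl), hn⟩, ?_⟩
          rintro c (rfl | hm)
          · exact hw
          · exact fun hs => (hall c hm) (Or.inl hs)
        · rintro ⟨⟨hnm, hn⟩, hall⟩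
          refine ⟨hn, fun c hm => ?_⟩
          rintro (hs | rfl)
          · exact hall c (Or.inr hm) hs
          · exact hnm hm
      exact if_congr hiff rfl rfl

-- on a ≤-sorted list, the adjacent scan decides Nodup
theorem pvAdjScan_eq (l : List String) (hp : l.Pairwise (· ≤ ·)) :
    pvAdjScan l = if l.Nodup then 1 else 0 := by
  induction l with
  | nil => simp [pvAdjScan]
  | cons a t ih =>
    cases t with
    | nil => simp [pvAdjScan]
    | cons b t =>
      have hp' : (b :: t).Pairwise (· ≤ ·) := hp.tail
      have hab : a ≤ b := (List.pairwise_cons.mp hp).1 b (by simp)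
      unfold pvAdjScan
      by_cases h : a = b
      · rw [if_pos (by simpa using h)]
        rw [if_neg]
        intro hn
        exact (List.nodup_cons.mp hn).1 (by simp [h])
      · rw [if_neg (by simpa using h), ih hp']
        have hmem : a ∉ b :: t := by
          rintro (hm : a ∈ b :: t)
          rcases List.mem_cons.mp hm with rfl | hm
          · exact h rfl
          · have hba : b ≤ a := (List.pairwise_cons.mp hp').1 a hm
            exact h (le_antisymm hab hba)
        have : (a :: b :: t).Nodup ↔ (b :: t).Nodup := by
          simp [List.nodup_cons, hmem]
        exact (if_congr this.symm rfl rfl)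

-- ===== VERDICT (by name: the statement is the Claim_ definition above) =====
theorem validate_passphrase_spec : Claim_equal_validate_passphrase := by
  intro pp _
  unfold Spec_validate_passphrase validate_passphrase validate_passphrase_alt
  rw [pvLoopA_eq]
  have hpw := PySem.List.sorted_pairwise ((PySem.Str.split₀ pp).map pvCanon) (fun x => x)
  have hperm := PySem.List.sorted_perm ((PySem.Str.split₀ pp).map pvCanon) (fun x => x) false
  show _ = pvAdjScan (PySem.List.sorted ((PySem.Str.split₀ pp).map pvCanon) (fun x => x) false)
  rw [pvAdjScan_eq _ hpw]
  refine if_congr ?_ rfl rfl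
  rw [hperm.nodup_iff]
  simp [PySem.Set.empty]
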